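-- pv_equiv track=rewrite | github.com/ykings12/deterministic-multi-agent-code-transformation | reviewer/reviewer.py | _parse_output
-- ===== SOURCE A (Python) =====
-- from typing import Dict, List
--
-- def _parse_output(output: str) -> Dict[str, str]:
--     """
--     Parse LLM output into:
--     file → code
--
--     Also detects duplicate file outputs.
--     """
--
--     files = {}
--     current_file = None
--     code_lines = []
--     seen_files = set()
--
--     for line in output.split("\n"):
--         if line.startswith("FILE:"):
--             if current_file:
--                 if current_file in seen_files:
--                     raise ValueError(f"Duplicate file output: {current_file}")
--
--                 files[current_file] = "\n".join(code_lines).strip()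
--                 seen_files.add(current_file)
--
--             current_file = line.replace("FILE:", "").strip()
--             code_lines = []
--         else:
--             code_lines.append(line)
--
--     if current_file:
--         if current_file in seen_files:
--             raise ValueError(f"Duplicate file output: {current_file}")
--
--         files[current_file] = "\n".join(code_lines).strip()
--
--     return files
-- ===== SOURCE B (Python) =====
-- from typing import Dict
--
-- def _parse_output(output: str) -> Dict[str, str]:
--     # Pass 1 (back to front): collect (name, code_lines) segments.
--     segs = []
--     acc = []
--     for line in reversed(output.split("\n")):
--         if line.startswith("FILE:"):
--             segs.append((line.replace("FILE:", "").strip(), acc[::-1]))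
--             acc = []
--         else:
--             acc.append(line)
--     # lines left in acc precede the first marker and are dropped
--     # Pass 2 (forward): build the mapping, refusing duplicates.
--     result = {}
--     for name, code in reversed(segs):
--         if not name:
--             continue
--         if name in result:
--             raise ValueError(f"Duplicate file output: {name}")
--         result[name] = "\n".join(code).strip()
--     return result
-- ===== Notes on version B (the rewrite author's own statement) =====
-- stated objective: alternative
-- what changed: Replaces A's single forward scan with interleaved dict-building and duplicate bookkeeping by a two-phase design: a backward scan that segments the lines into (filename, code) pairs (so no current-file/seen-set state is threaded through the parse), then a separate forward pass that builds the mapping and rejects duplicates.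
import Mathlib
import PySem

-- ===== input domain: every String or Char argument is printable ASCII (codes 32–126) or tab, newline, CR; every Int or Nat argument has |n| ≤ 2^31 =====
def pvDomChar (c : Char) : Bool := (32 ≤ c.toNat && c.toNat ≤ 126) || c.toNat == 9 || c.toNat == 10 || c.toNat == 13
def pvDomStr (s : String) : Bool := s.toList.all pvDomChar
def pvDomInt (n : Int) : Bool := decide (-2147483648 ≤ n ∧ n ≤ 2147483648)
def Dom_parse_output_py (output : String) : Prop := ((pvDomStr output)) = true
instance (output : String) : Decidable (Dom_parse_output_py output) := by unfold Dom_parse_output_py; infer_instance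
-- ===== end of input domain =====

-- B replaces A's single stateful forward scan by a backward segmentation pass plus a separate
-- forward dict-building pass (objective: alternative decomposition, same O(n) cost).
-- Pre_ excludes exactly the inputs where A raises ValueError (a duplicated non-empty FILE: name);
-- B raises the same error there.


-- ===== PORT A =====
-- loop body of A's forward scan; state = (files, current_file, code_lines, seen_files).
-- In the two duplicate branches Python raises ValueError; those inputs are excluded by Pre_.
def pyAStep (st : PySem.Dict String String × Option String × List String × PySem.Set String)
    (line : String) :
    PySem.Dict String String × Option String × List String × PySem.Set String :=
  if PySem.Str.startswith line "FILE:" then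
    let fs :=
      match st.2.1 with
      | some cf =>
        if cf ≠ "" then
          if st.2.2.2.contains cf then (st.1, st.2.2.2)  -- Python: raise ValueError (outside Pre_)
          else (st.1.insert cf (PySem.Str.strip (PySem.Str.join "\n" st.2.2.1)),
                PySem.Set.add st.2.2.2 cf)
        else (st.1, st.2.2.2)
      | none => (st.1, st.2.2.2)
    (fs.1, some (PySem.Str.strip (PySem.Str.replace line "FILE:" "")), ([] : List String), fs.2)
  else
    (st.1, st.2.1, st.2.2.1 ++ [line], st.2.2.2)

-- the trailing 'if current_file:' flush after the loop
def pyAFinal (st : PySem.Dict String String × Option String × List String × PySem.Set String) :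
    List (String × String) :=
  match st.2.1 with
  | some cf =>
    if cf ≠ "" then
      if st.2.2.2.contains cf then st.1.items  -- Python: raise ValueError (outside Pre_)
      else (st.1.insert cf (PySem.Str.strip (PySem.Str.join "\n" st.2.2.1))).items
    else st.1.items
  | none => st.1.items

def parse_output_py (output : String) : List (String × String) :=
  pyAFinal (((PySem.Str.split? output "\n").getD []).foldl pyAStep
    (PySem.Dict.empty, none, [], PySem.Set.empty))

-- ===== PORT B =====
-- B pass 1: backward scan ('for line in reversed(lines)' = foldr); state = (segs, acc), both
-- grown by Python-list append (++ [·]); at a marker the accumulated lines are acc[::-1].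
def pyBScan (line : String) (st : List (String × List String) × List String) :
    List (String × List String) × List String :=
  if PySem.Str.startswith line "FILE:" then
    (st.1 ++ [(PySem.Str.strip (PySem.Str.replace line "FILE:" ""), st.2.reverse)], [])
  else
    (st.1, st.2 ++ [line])

-- B pass 2: forward dict build over reversed(segs); skip empty names; Python raises ValueError
-- on a duplicate (outside Pre_), here that branch leaves the mapping unchanged.
def pyBBuild (result : List (String × String)) (seg : String × List String) :
    List (String × String) :=
  if seg.1 = "" then result
  else if result.any (fun kv => kv.1 = seg.1) then result  -- Python: raise ValueError (outside Pre_)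
  else result ++ [(seg.1, PySem.Str.strip (PySem.Str.join "\n" seg.2))]

def parse_output_py_alt (output : String) : List (String × String) :=
  ((((PySem.Str.split? output "\n").getD []).foldr pyBScan ([], [])).1.reverse).foldl pyBBuild []

-- ===== PRECONDITION & SPEC =====
-- Pre_ excludes exactly the inputs on which A raises ValueError: a non-empty stripped
-- 'FILE:' name occurring on two marker lines (B raises the same error there).
def Pre_parse_output_py (output : String) : Prop :=
  ((((((PySem.Str.split? output "\n").getD []).filter
        (fun l => PySem.Str.startswith l "FILE:")).map
      (fun l => PySem.Str.strip (PySem.Str.replace l "FILE:" ""))).filter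
    (fun n => decide (n ≠ ""))).Nodup)
instance (output : String) : Decidable (Pre_parse_output_py output) := by
  unfold Pre_parse_output_py; infer_instance

def pvWitness_parse_output_py : String := "FILE: a.py\nx = 1\nFILE: b.py\ny = 2"

def Spec_parse_output_py (output : String) (out : List (String × String)) : Prop := out = parse_output_py_alt output
instance (output : String) (out : List (String × String)) : Decidable (Spec_parse_output_py output out) := by unfold Spec_parse_output_py; infer_instance

-- ===== CLAIM (what is proved, stated in full; the proofs are below) =====
def Claim_equal_parse_output_py : Prop := ∀ (output : String), Dom_parse_output_py output → Pre_parse_output_py output → Spec_parse_output_py output (parse_output_py output)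

-- ===== LEMMAS AND PROOFS =====

-- proof-side vocabulary
def pvM (l : String) : Bool := PySem.Str.startswith l "FILE:"
def pvName (l : String) : String := PySem.Str.strip (PySem.Str.replace l "FILE:" "")
def pvVal (c : List String) : String := PySem.Str.strip (PySem.Str.join "\n" c)

-- reference segmentation: (segments of ls, lines of ls before its first marker)
def pvSegs : List String → List (String × List String) × List String
  | [] => ([], [])
  | l :: ls =>
    let p := pvSegs ls
    if pvM l then ((pvName l, p.2) :: p.1, []) else (p.1, l :: p.2)

def pvFlush (segs : List (String × List String)) : List (String × String) :=
  segs.filterMap (fun s => if s.1 = "" then none else some (s.1, pvVal s.2))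

def pvNE (segs : List (String × List String)) : List String :=
  (segs.map Prod.fst).filter (fun n => decide (n ≠ ""))

-- A's pending state read back as the segments still to be flushed
def pvSegsFrom (cur : Option String) (code : List String) (ls : List String) :
    List (String × List String) :=
  match cur with
  | none => (pvSegs ls).1
  | some cf => (cf, code ++ (pvSegs ls).2) :: (pvSegs ls).1

theorem pvSegs_cons_marker {l : String} (ls : List String) (h : pvM l = true) :
    pvSegs (l :: ls) = ((pvName l, (pvSegs ls).2) :: (pvSegs ls).1, []) := by
  simp only [pvSegs, h, if_true]

theorem pvSegs_cons_nonmarker {l : String} (ls : List String) (h : pvM l = false) :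
    pvSegs (l :: ls) = ((pvSegs ls).1, l :: (pvSegs ls).2) := by
  simp only [pvSegs, h, Bool.false_eq_true, if_false]

theorem pvNE_cons_empty (c : List String) (segs : List (String × List String)) :
    pvNE (("", c) :: segs) = pvNE segs := by simp [pvNE]

theorem pvNE_cons_ne {n : String} (h : n ≠ "") (c : List String)
    (segs : List (String × List String)) :
    pvNE ((n, c) :: segs) = n :: pvNE segs := by simp [pvNE, h]

theorem pvFlush_cons_empty (c : List String) (segs : List (String × List String)) :
    pvFlush (("", c) :: segs) = pvFlush segs := by simp [pvFlush]

theorem pvFlush_cons_ne {n : String} (h : n ≠ "") (c : List String)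
    (segs : List (String × List String)) :
    pvFlush ((n, c) :: segs) = (n, pvVal c) :: pvFlush segs := by simp [pvFlush, h]

theorem pvNE_segs (ls : List String) :
    pvNE (pvSegs ls).1 =
      ((ls.filter pvM).map pvName).filter (fun n => decide (n ≠ "")) := by
  induction ls with
  | nil => rfl
  | cons l ls ih =>
    by_cases h : pvM l = true
    · rw [pvSegs_cons_marker ls h, List.filter_cons_of_pos h, List.map_cons]
      by_cases hn : pvName l = ""
      · rw [hn, pvNE_cons_empty, List.filter_cons_of_neg (by simp), ih]
      · rw [pvNE_cons_ne hn, List.filter_cons_of_pos (by simp [hn]), ih]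
    · have h' : pvM l = false := by simpa using h
      rw [pvSegs_cons_nonmarker ls h', List.filter_cons_of_neg (by simp [h']), ih]

-- pass 1 of B computes pvSegs, with both components reversed
theorem pvB_scan (ls : List String) :
    ls.foldr pyBScan ([], []) = ((pvSegs ls).1.reverse, (pvSegs ls).2.reverse) := by
  induction ls with
  | nil => rfl
  | cons l ls ih =>
    rw [List.foldr_cons, ih]
    by_cases h : pvM l = true
    · have h' : PySem.Str.startswith l "FILE:" = true := h
      rw [pvSegs_cons_marker ls h]
      simp only [pyBScan, h', if_true]
      simp [pvName]
    · have h'' : pvM l = false := by simpa using h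
      have h' : PySem.Str.startswith l "FILE:" = false := h''
      rw [pvSegs_cons_nonmarker ls h'']
      simp only [pyBScan, h', Bool.false_eq_true, if_false]
      simp

-- pass 2 of B appends the flushed segments, as long as no duplicate key appears
theorem pvB_build (segs : List (String × List String)) (result : List (String × String))
    (h : (result.map Prod.fst ++ pvNE segs).Nodup) :
    segs.foldl pyBBuild result = result ++ pvFlush segs := by
  induction segs generalizing result with
  | nil => simp [pvFlush]
  | cons s segs ih =>
    obtain ⟨n, c⟩ := s
    rw [List.foldl_cons]
    by_cases hs : n = ""
    · subst hs
      rw [show pyBBuild result ("", c) = result from by simp [pyBBuild]]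
      rw [ih result (by simpa [pvNE_cons_empty] using h)]
      rw [pvFlush_cons_empty]
    · rw [pvNE_cons_ne hs] at h
      have hdisj := (List.nodup_append.mp h).2.2
      have hnotin : n ∉ result.map Prod.fst := fun hmem => hdisj n hmem n (by simp) rfl
      have hany : result.any (fun kv => decide (kv.1 = n)) = false := by
        rw [List.any_eq_false]
        intro kv hkv
        simpa using (fun (heq : kv.1 = n) => hnotin (heq ▸ List.mem_map_of_mem hkv))
      rw [show pyBBuild result (n, c) = result ++ [(n, pvVal c)] from by
        simp only [pyBBuild, if_neg hs, hany, Bool.false_eq_true, if_false, pvVal]]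
      rw [ih (result ++ [(n, pvVal c)]) (by simpa [List.append_assoc] using h)]
      rw [pvFlush_cons_ne hs]
      simp [List.append_assoc]

-- reductions of A's loop body
theorem pyAStep_nonmarker (st : PySem.Dict String String × Option String × List String × PySem.Set String)
    {l : String} (h : pvM l = false) :
    pyAStep st l = (st.1, st.2.1, st.2.2.1 ++ [l], st.2.2.2) := by
  have h' : PySem.Str.startswith l "FILE:" = false := h
  simp only [pyAStep, h', Bool.false_eq_true, if_false]

theorem pyAStep_marker_none (files : PySem.Dict String String) (code : List String)
    (seen : PySem.Set String) {l : String} (h : pvM l = true) :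
    pyAStep (files, none, code, seen) l = (files, some (pvName l), [], seen) := by
  have h' : PySem.Str.startswith l "FILE:" = true := h
  simp only [pyAStep, h', if_true]
  rfl

theorem pyAStep_marker_empty (files : PySem.Dict String String) (code : List String)
    (seen : PySem.Set String) {l : String} (h : pvM l = true) :
    pyAStep (files, some "", code, seen) l = (files, some (pvName l), [], seen) := by
  have h' : PySem.Str.startswith l "FILE:" = true := h
  simp only [pyAStep, h', if_true]
  rfl

theorem pyAStep_marker_fresh (files : PySem.Dict String String) (code : List String)
    (seen : PySem.Set String) {cf l : String} (hcf : cf ≠ "") (h : pvM l = true)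
    (hdup : seen.contains cf = false) :
    pyAStep (files, some cf, code, seen) l =
      (files.insert cf (pvVal code), some (pvName l), [], PySem.Set.add seen cf) := by
  have h' : PySem.Str.startswith l "FILE:" = true := h
  have hdup' : cf ∉ seen := by simpa using hdup
  simp only [pyAStep, h', if_true]
  simp [hcf, hdup', pvVal, pvName]

-- the invariant relating A's loop state to the reference segmentation
theorem pvA_run (ls : List String) (files : PySem.Dict String String) (cur : Option String)
    (code : List String) (seen : PySem.Set String)
    (hseen : ∀ x, seen.contains x = files.contains x)
    (hnd : (files.keys ++ pvNE (pvSegsFrom cur code ls)).Nodup) :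
    pyAFinal (ls.foldl pyAStep (files, cur, code, seen)) =
      files.items ++ pvFlush (pvSegsFrom cur code ls) := by
  induction ls generalizing files cur code seen with
  | nil =>
    cases cur with
    | none => simp [pyAFinal, pvSegsFrom, pvSegs, pvFlush]
    | some cf =>
      by_cases hcf : cf = ""
      · subst hcf
        rw [List.foldl_nil]
        rw [show pyAFinal (files, some "", code, seen) = files.items from by
          simp [pyAFinal]]
        simp only [pvSegsFrom, pvSegs, pvFlush_cons_empty]
        simp [pvFlush]
      · have hmem : cf ∉ files.keys := by
          have hdisj := (List.nodup_append.mp hnd).2.2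
          intro hk
          exact hdisj cf hk cf (by
            simp only [pvSegsFrom, pvSegs, pvNE_cons_ne hcf]
            exact List.mem_cons_self ..) rfl
        have hcont : files.contains cf = false := by
          rw [PySem.Dict.contains_eq_decide_mem_keys]; simpa using hmem
        have hdup : seen.contains cf = false := by rw [hseen cf]; exact hcont
        rw [List.foldl_nil]
        rw [show pyAFinal (files, some cf, code, seen) =
            (files.insert cf (pvVal code)).items from by
          have hdup' : cf ∉ seen := by simpa using hdup
          simp [pyAFinal, hcf, hdup', pvVal]]
        rw [PySem.Dict.items_insert_of_not_contains _ _ hcont]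
        simp only [pvSegsFrom, pvSegs, pvFlush_cons_ne hcf]
        simp [pvFlush]
  | cons l ls ih =>
    rw [List.foldl_cons]
    by_cases hM : pvM l = true
    · cases cur with
      | none =>
        rw [pyAStep_marker_none files code seen hM]
        rw [ih files (some (pvName l)) [] seen hseen (by
          simpa only [pvSegsFrom, pvSegs_cons_marker ls hM, List.nil_append] using hnd)]
        simp only [pvSegsFrom, pvSegs_cons_marker ls hM, List.nil_append]
      | some cf =>
        by_cases hcf : cf = ""
        · subst hcf
          rw [pyAStep_marker_empty files code seen hM]
          rw [ih files (some (pvName l)) [] seen hseen (by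
            have h2 := hnd
            simp only [pvSegsFrom, pvSegs_cons_marker ls hM, pvNE_cons_empty] at h2
            simpa only [pvSegsFrom, List.nil_append] using h2)]
          simp only [pvSegsFrom, pvSegs_cons_marker ls hM, pvFlush_cons_empty,
            List.nil_append]
        · have hmem : cf ∉ files.keys := by
            have hdisj := (List.nodup_append.mp hnd).2.2
            intro hk
            exact hdisj cf hk cf (by
              simp only [pvSegsFrom, pvNE_cons_ne hcf]
              exact List.mem_cons_self ..) rfl
          have hcont : files.contains cf = false := by
            rw [PySem.Dict.contains_eq_decide_mem_keys]; simpa using hmem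
          rw [pyAStep_marker_fresh files code seen hcf hM (by rw [hseen cf]; exact hcont)]
          have hseen' : ∀ x, (PySem.Set.add seen cf).contains x =
              (files.insert cf (pvVal code)).contains x := by
            intro x
            have hb : ∀ (a b : Bool), (a = true ↔ b = true) → a = b := by
              intro a b hab; cases a <;> cases b <;> simp_all
            apply hb
            rw [PySem.Dict.contains_eq_decide_mem_keys, decide_eq_true_iff,
              PySem.Dict.mem_keys_insert]
            have hset : (PySem.Set.add seen cf).contains x = true ↔ x ∈ PySem.Set.add seen cf := by
              simp [PySem.Set.contains]
            rw [hset, PySem.Set.mem_add]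
            have hmemiff : x ∈ seen ↔ x ∈ files.keys := by
              have hx := hseen x
              rw [PySem.Dict.contains_eq_decide_mem_keys] at hx
              constructor
              · intro hm
                have : seen.contains x = true := by
                  simpa [PySem.Set.contains, List.contains_iff_mem] using hm
                rw [this] at hx
                exact of_decide_eq_true hx.symm
              · intro hm
                have : List.contains seen x = true := by
                  rw [show (List.contains seen x) = PySem.Set.contains seen x from rfl, hx]
                  exact decide_eq_true hm
                simpa [List.contains_iff_mem] using this
            rw [hmemiff]
            tauto
          have hnd2 : ((files.insert cf (pvVal code)).keys ++
              pvNE (pvSegsFrom (some (pvName l)) [] ls)).Nodup := by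
            rw [PySem.Dict.keys_insert_of_not_contains _ _ hcont]
            have h2 := hnd
            simp only [pvSegsFrom, pvSegs_cons_marker ls hM, pvNE_cons_ne hcf] at h2
            simpa only [pvSegsFrom, List.nil_append, List.append_assoc,
              List.singleton_append] using h2
          rw [ih (files.insert cf (pvVal code)) (some (pvName l)) [] (PySem.Set.add seen cf)
            hseen' hnd2]
          rw [PySem.Dict.items_insert_of_not_contains _ _ hcont]
          simp only [pvSegsFrom, pvSegs_cons_marker ls hM, pvFlush_cons_ne hcf,
            List.nil_append, List.append_nil, List.append_assoc, List.singleton_append]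
    · have hM' : pvM l = false := by simpa using hM
      rw [pyAStep_nonmarker _ hM']
      cases cur with
      | none =>
        rw [ih files none (code ++ [l]) seen hseen (by
          simpa only [pvSegsFrom, pvSegs_cons_nonmarker ls hM'] using hnd)]
        simp only [pvSegsFrom, pvSegs_cons_nonmarker ls hM']
      | some cf =>
        rw [ih files (some cf) (code ++ [l]) seen hseen (by
          simpa only [pvSegsFrom, pvSegs_cons_nonmarker ls hM', List.append_assoc,
            List.cons_append, List.nil_append] using hnd)]
        simp only [pvSegsFrom, pvSegs_cons_nonmarker ls hM', List.append_assoc,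
          List.cons_append, List.nil_append]

-- ===== VERDICT (by name: the statement is the Claim_ definition above) =====
theorem parse_output_py_spec : Claim_equal_parse_output_py := by
  intro output _hdom hpre
  unfold Spec_parse_output_py parse_output_py parse_output_py_alt
  rw [pvB_scan, List.reverse_reverse]
  rw [pvA_run ((PySem.Str.split? output "\n").getD []) PySem.Dict.empty none [] PySem.Set.empty
      (fun _ => rfl)
      (by
        simp only [PySem.Dict.keys_empty, List.nil_append, pvSegsFrom]
        rw [pvNE_segs]
        exact hpre)]
  rw [pvB_build _ [] (by
    simp only [List.map_nil, List.nil_append]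
    rw [pvNE_segs]
    exact hpre)]
  simp only [pvSegsFrom, List.nil_append]
  rw [show PySem.Dict.empty.items = ([] : List (String × String)) from rfl]
  simp
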